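-- pv_equiv track=rewrite | github.com/goldbugM/mage | transform_guides.py | add_main_title
-- ===== SOURCE A (Python) =====
-- def add_main_title(content: str, title: str) -> str:
--     """Add H1 title at the beginning of content if not present."""
--     lines = content.split('\n')
--
--     # Check if first non-empty line is already an H1
--     for line in lines:
--         if line.strip():
--             if line.startswith('# '):
--                 return content  # Already has H1
--             break
--
--     # Add H1 title
--     title_line = f"# {title}"
--     if lines and lines[0].strip():
--         return f"{title_line}\n\n{content}"
--     else:
--         # Find first non-empty line and insert before it
--         for i, line in enumerate(lines):
--             if line.strip():
--                 lines.insert(i, title_line)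
--                 lines.insert(i + 1, "")
--                 return '\n'.join(lines)
--
--         # If all lines are empty, just add at the beginning
--         return f"{title_line}\n\n{content}"
-- ===== SOURCE B (Python) =====
-- def add_main_title(content: str, title: str) -> str:
--     """Add H1 title at the beginning of content if not present."""
--     s = 0  # start index of the line currently being scanned
--     for k, ch in enumerate(content):
--         if ch == '\n':
--             s = k + 1
--         elif not ch.isspace():
--             # first non-blank line starts at index s
--             if content.startswith('# ', s):
--                 return content
--             return f"{content[:s]}# {title}\n\n{content[s:]}"
--     # content is entirely whitespace
--     return f"# {title}\n\n{content}"
-- ===== Notes on version B (the rewrite author's own statement) =====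
-- stated objective: alternative
-- what changed: B never builds a line list: instead of A's split('\n'), loop over lines and three separate insertion branches (string prepend, in-place list insert, all-empty fallback), B makes one character-level scan that tracks the start index of the current line and performs a single slice concatenation content[:s] + '# title\n\n' + content[s:].
import Mathlib
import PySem

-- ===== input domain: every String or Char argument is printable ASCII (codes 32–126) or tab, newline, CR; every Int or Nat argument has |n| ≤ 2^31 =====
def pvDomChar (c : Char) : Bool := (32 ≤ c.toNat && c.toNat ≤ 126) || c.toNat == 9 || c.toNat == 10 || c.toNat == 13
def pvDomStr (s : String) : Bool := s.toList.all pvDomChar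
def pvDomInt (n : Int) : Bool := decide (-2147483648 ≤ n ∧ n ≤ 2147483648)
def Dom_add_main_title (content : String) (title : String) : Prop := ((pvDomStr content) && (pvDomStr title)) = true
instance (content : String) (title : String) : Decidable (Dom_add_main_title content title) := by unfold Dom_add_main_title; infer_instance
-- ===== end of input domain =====

-- B replaces A's split-into-lines / loop-over-lines / three insertion branches by a single
-- character scan that tracks the start index of the current line and one slice concatenation
-- (objective: simpler — no line list is ever built).

-- ===== PORT A =====
-- A's first loop: returns some (line.startswith '# ') at the first line with truthy strip,
-- none if the loop finishes (all lines blank); 'some true' = A's early 'return content'.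
def aCheck : List (List Char) → Option Bool
  | [] => none
  | l :: rest =>
    if PySem.Chars.strip l ≠ [] then some (PySem.Chars.startswith l ['#', ' '])
    else aCheck rest

-- A's second loop: at the first line with truthy strip, insert title_line and "" before it and
-- return the resulting list; none if the loop finishes without finding one.
def aIns (tl : List Char) : List (List Char) → Option (List (List Char))
  | [] => none
  | l :: rest =>
    if PySem.Chars.strip l ≠ [] then some (tl :: [] :: l :: rest)
    else (aIns tl rest).map (l :: ·)

def aCore (c t : List Char) : List Char :=
  let lines := PySem.Chars.splitOn c ['\n']
  match aCheck lines with
  | some true => c            -- already has H1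
  | _ =>
    let titleLine := '#' :: ' ' :: t               -- f"# {title}"
    -- 'if lines and lines[0].strip():'
    let cond : Bool := match lines with
      | [] => false
      | l0 :: _ => PySem.Chars.strip l0 ≠ []
    if cond then titleLine ++ '\n' :: '\n' :: c    -- f"{title_line}\n\n{content}"
    else
      match aIns titleLine lines with
      | some ls => PySem.Chars.join ['\n'] ls      -- '\n'.join(lines)
      | none => titleLine ++ '\n' :: '\n' :: c     -- all lines empty

def add_main_title (content : String) (title : String) : String :=
  String.ofList (aCore content.toList title.toList)

-- ===== PORT B =====
-- B's single for-loop over enumerate(content): k is the running index, s the start index of the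
-- line currently scanned; returns some s at the first non-whitespace character, none at loop end.
def bLoop : List Char → Nat → Nat → Option Nat
  | [], _, _ => none
  | ch :: rest, k, s =>
    if ch = '\n' then bLoop rest (k + 1) (k + 1)
    else if PySem.Chars.isspace ch then bLoop rest (k + 1) s
    else some s

def bCore (c t : List Char) : List Char :=
  match bLoop c 0 0 with
  | some s =>
    -- content.startswith('# ', s) with 0 ≤ s ≤ len(content) is content[s:].startswith('# ')
    if PySem.Chars.startswith (c.drop s) ['#', ' '] then c
    else c.take s ++ ('#' :: ' ' :: t) ++ ('\n' :: '\n' :: c.drop s)   -- f"{content[:s]}# {title}\n\n{content[s:]}"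
  | none => ('#' :: ' ' :: t) ++ ('\n' :: '\n' :: c)                   -- f"# {title}\n\n{content}"

def add_main_title_alt (content : String) (title : String) : String :=
  String.ofList (bCore content.toList title.toList)

-- ===== PRECONDITION & SPEC =====
def Spec_add_main_title (content : String) (title : String) (out : String) : Prop := out = add_main_title_alt content title
instance (content : String) (title : String) (out : String) : Decidable (Spec_add_main_title content title out) := by unfold Spec_add_main_title; infer_instance

-- ===== CLAIM (what is proved, stated in full; the proofs are below) =====
def Claim_equal_add_main_title : Prop := ∀ (content : String) (title : String), Dom_add_main_title content title → Spec_add_main_title content title (add_main_title content title)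

-- ===== LEMMAS AND PROOFS =====

-- A fuel-free rendering of splitOn.go's recursion for sep = ['\n'].
def msp : List Char → List Char → List (List Char)
  | cur, [] => [cur.reverse]
  | cur, c :: rest => if c = '\n' then cur.reverse :: msp [] rest else msp (c :: cur) rest

theorem msp_go (fuel : Nat) (l cur : List Char) (acc : List (List Char))
    (h : l.length < fuel) :
    PySem.Chars.splitOn.go ['\n'] fuel l cur acc = acc.reverse ++ msp cur l := by
  induction fuel generalizing l cur acc with
  | zero => omega
  | succ n ih =>
    cases l with
    | nil => simp [PySem.Chars.splitOn.go, msp]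
    | cons c rest =>
      simp only [PySem.Chars.splitOn.go, msp]
      by_cases hc : c = '\n'
      · subst hc
        simp only [List.isPrefixOf, BEq.rfl, Bool.true_and, if_pos]
        rw [ih]
        · simp
        · simpa using Nat.lt_of_succ_lt_succ h
      · have : List.isPrefixOf ['\n'] (c :: rest) = false := by
          simp [List.isPrefixOf]
          intro h'; exact absurd h'.symm hc
        rw [this]
        simp only [Bool.false_eq_true, if_false, if_neg hc]
        exact ih rest (c :: cur) acc (by simpa using Nat.lt_of_succ_lt_succ h)

theorem splitOn_eq_msp (c : List Char) :
    PySem.Chars.splitOn c ['\n'] = msp [] c := by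
  have := msp_go (c.length + 1) c [] [] (by omega)
  simpa [PySem.Chars.splitOn] using this

theorem msp_ne_nil (cur l : List Char) : msp cur l ≠ [] := by
  induction l generalizing cur with
  | nil => simp [msp]
  | cons c rest ih =>
    simp only [msp]
    split
    · simp
    · exact ih _

theorem join_msp (cur l : List Char) :
    PySem.Chars.join ['\n'] (msp cur l) = cur.reverse ++ l := by
  induction l generalizing cur with
  | nil => simp [msp, PySem.Chars.join_singleton]
  | cons c rest ih =>
    simp only [msp]
    by_cases hc : c = '\n'
    · subst hc
      rw [if_pos rfl]
      obtain ⟨y, ys, hy⟩ := List.exists_cons_of_ne_nil (msp_ne_nil [] rest)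
      rw [hy, PySem.Chars.join_cons_cons, ← hy, ih]
      simp
    · rw [if_neg hc, ih]
      simp

theorem join_roundtrip (c : List Char) :
    PySem.Chars.join ['\n'] (msp [] c) = c := by
  rw [join_msp]; rfl

-- strip l is empty iff every character of l is whitespace.
theorem strip_nil_iff (l : List Char) :
    PySem.Chars.strip l = [] ↔ ∀ x ∈ l, PySem.Chars.isspace x := by
  simp only [PySem.Chars.strip, PySem.Chars.rstrip, PySem.Chars.lstrip,
    List.reverse_eq_nil_iff, List.dropWhile_eq_nil_iff, List.mem_reverse]
  constructor
  · intro h x hx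
    rw [← List.takeWhile_append_dropWhile (p := PySem.Chars.isspace) (l := l)] at hx
    rcases List.mem_append.1 hx with h1 | h2
    · exact List.mem_takeWhile_imp h1
    · exact h x h2
  · intro h x hx
    exact h x ((List.dropWhile_sublist _).subset hx)

-- no newline: msp yields a single line
theorem msp_no_nl (cur c : List Char) (h : '\n' ∉ c) : msp cur c = [cur.reverse ++ c] := by
  induction c generalizing cur with
  | nil => simp [msp]
  | cons x rest ih =>
    have hx : x ≠ '\n' := fun hx => h (hx ▸ List.mem_cons_self)
    rw [msp, if_neg hx, ih _ (fun hm => h (List.mem_cons_of_mem _ hm))]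
    simp

-- split at the first newline
theorem msp_split (cur l r : List Char) (h : '\n' ∉ l) :
    msp cur (l ++ '\n' :: r) = (cur.reverse ++ l) :: msp [] r := by
  induction l generalizing cur with
  | nil => simp [msp]
  | cons x xs ih =>
    have hx : x ≠ '\n' := fun hx => h (hx ▸ List.mem_cons_self)
    rw [List.cons_append, msp, if_neg hx, ih _ (fun hm => h (List.mem_cons_of_mem _ hm))]
    simp

theorem msp_nil_no_nl (c : List Char) (h : '\n' ∉ c) : msp [] c = [c] := by
  simpa using msp_no_nl [] c h

theorem msp_nil_split (l r : List Char) (h : '\n' ∉ l) :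
    msp [] (l ++ '\n' :: r) = l :: msp [] r := by
  simpa using msp_split [] l r h

theorem split_first_nl (c : List Char) (h : '\n' ∈ c) :
    ∃ l r, c = l ++ '\n' :: r ∧ '\n' ∉ l := by
  induction c with
  | nil => cases h
  | cons x rest ih =>
    by_cases hx : x = '\n'
    · exact ⟨[], rest, by rw [hx]; rfl, by simp⟩
    · have hm : '\n' ∈ rest := by
        rcases List.mem_cons.1 h with h1 | h2
        · exact absurd h1.symm hx
        · exact h2
      obtain ⟨l, r, hc, hnl⟩ := ih hm
      exact ⟨x :: l, r, by rw [hc]; rfl, by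
        intro hm2
        rcases List.mem_cons.1 hm2 with h1 | h2
        · exact hx h1.symm
        · exact hnl h2⟩

-- bLoop returns none exactly on all-whitespace input
theorem bLoop_none_iff (c : List Char) (k s : Nat) :
    bLoop c k s = none ↔ ∀ x ∈ c, PySem.Chars.isspace x := by
  induction c generalizing k s with
  | nil => simp [bLoop]
  | cons ch rest ih =>
    by_cases hnl : ch = '\n'
    · subst hnl
      rw [bLoop, if_pos rfl]
      simp [ih, show PySem.Chars.isspace '\n' = true from rfl]
    · by_cases hsp : PySem.Chars.isspace ch
      · rw [bLoop, if_neg hnl, if_pos hsp]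
        simp [ih, hsp]
      · rw [bLoop, if_neg hnl, if_neg hsp]
        simp [hsp]

-- bLoop returns s unchanged when a non-whitespace character occurs before any newline
theorem bLoop_found (l rest : List Char) (k s : Nat) (hnl : '\n' ∉ l)
    (hns : ¬ ∀ x ∈ l, PySem.Chars.isspace x) :
    bLoop (l ++ rest) k s = some s := by
  induction l generalizing k with
  | nil => exact absurd (by simp) hns
  | cons x xs ih =>
    have hx : x ≠ '\n' := fun hx => hnl (hx ▸ List.mem_cons_self)
    by_cases hsp : PySem.Chars.isspace x
    · rw [List.cons_append, bLoop, if_neg hx, if_pos hsp]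
      refine ih _ (fun hm => hnl (List.mem_cons_of_mem _ hm)) ?_
      intro hall
      exact hns (by
        intro y hy
        rcases List.mem_cons.1 hy with h1 | h2
        · exact h1 ▸ hsp
        · exact hall y h2)
    · rw [List.cons_append, bLoop, if_neg hx, if_neg hsp]

-- index shift
theorem bLoop_shift (c : List Char) (k s d : Nat) :
    bLoop c (k + d) (s + d) = (bLoop c k s).map (· + d) := by
  induction c generalizing k s with
  | nil => simp [bLoop]
  | cons ch rest ih =>
    by_cases hnl : ch = '\n'
    · subst hnl
      rw [bLoop, if_pos rfl, bLoop, if_pos rfl,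
        show k + d + 1 = (k + 1) + d from by omega, ih]
    · by_cases hsp : PySem.Chars.isspace ch
      · rw [bLoop, if_neg hnl, if_pos hsp, bLoop, if_neg hnl, if_pos hsp,
          show k + d + 1 = (k + 1) + d from by omega, ih]
      · rw [bLoop, if_neg hnl, if_neg hsp, bLoop, if_neg hnl, if_neg hsp]
        rfl

-- an all-whitespace newline-free first line is skipped
theorem bLoop_skip (l r : List Char) (k s : Nat) (hnl : '\n' ∉ l)
    (hws : ∀ x ∈ l, PySem.Chars.isspace x) :
    bLoop (l ++ '\n' :: r) k s = bLoop r (k + l.length + 1) (k + l.length + 1) := by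
  induction l generalizing k with
  | nil => simp [bLoop]
  | cons x xs ih =>
    have hx : x ≠ '\n' := fun hx => hnl (hx ▸ List.mem_cons_self)
    have hsp : PySem.Chars.isspace x := hws x List.mem_cons_self
    rw [List.cons_append, bLoop, if_neg hx, if_pos hsp,
      ih _ (fun hm => hnl (List.mem_cons_of_mem _ hm)) (fun y hy => hws y (List.mem_cons_of_mem _ hy))]
    congr 1 <;> simp <;> omega

-- aCheck over msp is none exactly when everything is whitespace
theorem aCheck_msp_none_iff (c cur : List Char) :
    aCheck (msp cur c) = none ↔
      ((∀ x ∈ cur, PySem.Chars.isspace x) ∧ ∀ x ∈ c, PySem.Chars.isspace x) := by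
  induction c generalizing cur with
  | nil =>
    rw [msp, aCheck]
    by_cases hs : PySem.Chars.strip cur.reverse = []
    · rw [if_neg (by simpa using hs)]
      rw [strip_nil_iff] at hs
      simp [aCheck]
      intro x hx
      exact hs x (List.mem_reverse.2 hx)
    · rw [if_pos (by simpa using hs)]
      rw [strip_nil_iff] at hs
      refine iff_of_false (by simp) ?_
      rintro ⟨h1, -⟩
      push Not at hs
      obtain ⟨x, hx, hxs⟩ := hs
      exact hxs (h1 x (List.mem_reverse.1 hx))
  | cons ch rest ih =>
    by_cases hc : ch = '\n'
    · subst hc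
      rw [msp, if_pos rfl, aCheck]
      by_cases hs : PySem.Chars.strip cur.reverse = []
      · rw [if_neg (by simpa using hs), ih]
        rw [strip_nil_iff] at hs
        constructor
        · rintro ⟨-, h2⟩
          exact ⟨fun x hx => hs x (List.mem_reverse.2 hx), by
            intro y hy
            rcases List.mem_cons.1 hy with h1 | h2'
            · exact h1 ▸ rfl
            · exact h2 y h2'⟩
        · rintro ⟨-, h2⟩
          exact ⟨by simp, fun y hy => h2 y (List.mem_cons_of_mem _ hy)⟩
      · rw [if_pos (by simpa using hs)]
        rw [strip_nil_iff] at hs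
        refine iff_of_false (by simp) ?_
        rintro ⟨h1, -⟩
        push Not at hs
        obtain ⟨x, hx, hxs⟩ := hs
        exact hxs (h1 x (List.mem_reverse.1 hx))
    · rw [msp, if_neg hc, ih]
      constructor
      · rintro ⟨h1, h2⟩
        exact ⟨fun x hx => h1 x (List.mem_cons_of_mem _ hx), by
          intro y hy
          rcases List.mem_cons.1 hy with hy1 | hy2
          · exact hy1 ▸ h1 ch List.mem_cons_self
          · exact h2 y hy2⟩
      · rintro ⟨h1, h2⟩
        exact ⟨by
          intro y hy
          rcases List.mem_cons.1 hy with hy1 | hy2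
          · exact hy1 ▸ h2 ch List.mem_cons_self
          · exact h1 y hy2,
          fun y hy => h2 y (List.mem_cons_of_mem _ hy)⟩

theorem aIns_none_of (tl : List Char) (L : List (List Char)) (h : aCheck L = none) :
    aIns tl L = none := by
  induction L with
  | nil => rfl
  | cons l rest ih =>
    rw [aCheck] at h
    by_cases hs : PySem.Chars.strip l ≠ []
    · rw [if_pos hs] at h; cases h
    · rw [if_neg hs] at h
      rw [aIns, if_neg hs, ih h]
      rfl

theorem aIns_some_of (tl : List Char) (L : List (List Char)) (b : Bool) (h : aCheck L = some b) :
    ∃ ins, aIns tl L = some ins ∧ ins ≠ [] := by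
  induction L with
  | nil => cases h
  | cons l rest ih =>
    rw [aCheck] at h
    by_cases hs : PySem.Chars.strip l ≠ []
    · exact ⟨tl :: [] :: l :: rest, by rw [aIns, if_pos hs], by simp⟩
    · rw [if_neg hs] at h
      obtain ⟨ins, hins, -⟩ := ih h
      exact ⟨l :: ins, by rw [aIns, if_neg hs, hins]; rfl, by simp⟩

-- the '# ' pattern contains no newline, so startswith on the first line equals startswith on c
theorem startswith_line (l r : List Char) :
    PySem.Chars.startswith (l ++ '\n' :: r) ['#', ' '] = PySem.Chars.startswith l ['#', ' '] := by
  match l with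
  | [] => simp [PySem.Chars.startswith, List.isPrefixOf]
  | [x] => simp [PySem.Chars.startswith, List.isPrefixOf]
  | x :: y :: ys => simp [PySem.Chars.startswith, List.isPrefixOf]

theorem drop_split (l r : List Char) (m : Nat) :
    (l ++ '\n' :: r).drop (l.length + 1 + m) = r.drop m := by
  induction l with
  | nil =>
    rw [List.nil_append, show ([] : List Char).length + 1 + m = m + 1 from by simp; omega,
      List.drop_succ_cons]
  | cons x xs ih =>
    rw [List.cons_append, List.length_cons,
      show xs.length + 1 + 1 + m = (xs.length + 1 + m) + 1 from by omega,
      List.drop_succ_cons, ih]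

theorem take_split (l r : List Char) (m : Nat) :
    (l ++ '\n' :: r).take (l.length + 1 + m) = l ++ '\n' :: r.take m := by
  induction l with
  | nil =>
    rw [List.nil_append, show ([] : List Char).length + 1 + m = m + 1 from by simp; omega,
      List.take_succ_cons, List.nil_append]
  | cons x xs ih =>
    rw [List.cons_append, List.length_cons,
      show xs.length + 1 + 1 + m = (xs.length + 1 + m) + 1 from by omega,
      List.take_succ_cons, ih, List.cons_append]

-- aCore when the check answered true
-- join after inserting the title line and a blank line at the head
theorem join_insert_head (tl : List Char) (M : List (List Char)) (hM : M ≠ []) :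
    PySem.Chars.join ['\n'] (tl :: [] :: M) = tl ++ '\n' :: '\n' :: PySem.Chars.join ['\n'] M := by
  obtain ⟨m0, M', rfl⟩ := List.exists_cons_of_ne_nil hM
  rw [PySem.Chars.join_cons_cons, PySem.Chars.join_cons_cons]
  simp

theorem aCore_check_true (c t : List Char) (h : aCheck (msp [] c) = some true) :
    aCore c t = c := by
  simp only [aCore]
  rw [splitOn_eq_msp, h]

-- aCore when the check answered false: it returns the join of the inserted line list
theorem aCore_check_false (c t : List Char) (ins : List (List Char))
    (hc : aCheck (msp [] c) = some false)
    (hi : aIns ('#' :: ' ' :: t) (msp [] c) = some ins) :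
    aCore c t = PySem.Chars.join ['\n'] ins := by
  obtain ⟨l0, L, hL⟩ := List.exists_cons_of_ne_nil (msp_ne_nil [] c)
  have hjoin : PySem.Chars.join ['\n'] (l0 :: L) = c := by rw [← hL, join_roundtrip]
  rw [hL] at hc hi
  simp only [aCore]
  rw [splitOn_eq_msp, hL, hc]
  by_cases hs : PySem.Chars.strip l0 ≠ []
  · rw [aIns, if_pos hs] at hi
    injection hi with hi
    subst hi
    rw [join_insert_head _ _ (by simp), hjoin]
    simp [hs]
  · rw [aIns, if_neg hs] at hi
    simp only [ne_eq, not_not] at hs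
    simp only [hs, ne_eq, not_true_eq_false, decide_false, Bool.false_eq_true, if_false]
    rw [aIns, if_neg (by simp [hs]), hi]

theorem core_eq_no_nl (c t : List Char) (h : '\n' ∉ c) : aCore c t = bCore c t := by
  have hmsp := msp_nil_no_nl c h
  by_cases hall : ∀ x ∈ c, PySem.Chars.isspace x
  · -- all whitespace: both take the fallback branch
    have ha : aCheck (msp [] c) = none := (aCheck_msp_none_iff c []).2 ⟨by simp, hall⟩
    have hai := aIns_none_of ('#' :: ' ' :: t) _ ha
    have hb : bLoop c 0 0 = none := (bLoop_none_iff c 0 0).2 hall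
    have hstrip : PySem.Chars.strip c = [] := (strip_nil_iff c).2 hall
    simp only [aCore, bCore]
    rw [splitOn_eq_msp, hmsp]
    rw [hmsp] at ha hai
    rw [ha, hb, hai]
    simp [hstrip]
  · -- a non-whitespace character exists (before any newline, there being none)
    have hstrip : PySem.Chars.strip c ≠ [] := by rw [Ne, strip_nil_iff]; exact hall
    have hb : bLoop c 0 0 = some 0 := by
      have := bLoop_found c [] 0 0 h hall
      simpa using this
    simp only [aCore, bCore]
    rw [splitOn_eq_msp, hmsp, hb, aCheck, if_pos hstrip]
    by_cases hsw : PySem.Chars.startswith c ['#', ' ']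
    · simp [hsw]
    · simp [hsw, hstrip]

theorem core_eq (c t : List Char) : aCore c t = bCore c t := by
  have key : ∀ n (c t : List Char), c.length ≤ n → aCore c t = bCore c t := by
    intro n
    induction n with
    | zero =>
      intro c t hlen
      have : c = [] := by cases c with | nil => rfl | cons x xs => simp at hlen
      subst this
      exact core_eq_no_nl [] t (by simp)
    | succ n ih =>
      intro c t hlen
      by_cases hmem : '\n' ∈ c
      · obtain ⟨l, r, rfl, hnl⟩ := split_first_nl c hmem
        have hlenr : r.length ≤ n := by simp at hlen; omega
        have hlines : PySem.Chars.splitOn (l ++ '\n' :: r) ['\n'] = l :: msp [] r := by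
          rw [splitOn_eq_msp, msp_nil_split l r hnl]
        by_cases halll : ∀ x ∈ l, PySem.Chars.isspace x
        · -- blank first line: both sides recurse into r (unless r is all blank)
          have hstrip : PySem.Chars.strip l = [] := (strip_nil_iff l).2 halll
          have hskip : bLoop (l ++ '\n' :: r) 0 0 = bLoop r (l.length + 1) (l.length + 1) := by
            rw [bLoop_skip l r 0 0 hnl halll]
            norm_num
          by_cases hallr : ∀ x ∈ r, PySem.Chars.isspace x
          · -- everything blank: both fall back to prepending
            have ha : aCheck (msp [] (l ++ '\n' :: r)) = none :=
              (aCheck_msp_none_iff _ []).2 ⟨by simp, by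
                intro y hy
                rcases List.mem_append.1 hy with h1 | h2
                · exact halll y h1
                · rcases List.mem_cons.1 h2 with h3 | h4
                  · exact h3 ▸ rfl
                  · exact hallr y h4⟩
            have hai := aIns_none_of ('#' :: ' ' :: t) _ ha
            have hb : bLoop (l ++ '\n' :: r) 0 0 = none := by
              rw [hskip]
              exact (bLoop_none_iff r _ _).2 hallr
            simp only [aCore, bCore]
            rw [splitOn_eq_msp, msp_nil_split l r hnl] at ⊢
            rw [msp_nil_split l r hnl] at ha hai
            rw [ha, hb, hai]
            simp [hstrip]
          · -- r contains text: peel the blank first line off both sides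
            cases hCL : aCheck (msp [] r) with
            | none =>
              exact absurd ((aCheck_msp_none_iff r []).1 hCL).2 hallr
            | some b =>
              cases hBL : bLoop r 0 0 with
              | none => exact absurd ((bLoop_none_iff r 0 0).1 hBL) hallr
              | some s' =>
                have hshift : bLoop (l ++ '\n' :: r) 0 0 = some (s' + (l.length + 1)) := by
                  rw [hskip, show l.length + 1 = 0 + (l.length + 1) from by omega,
                    bLoop_shift, hBL]
                  simp
                have hB : bCore (l ++ '\n' :: r) t = l ++ '\n' :: bCore r t := by
                  simp only [bCore]
                  rw [hshift, hBL,
                    show s' + (l.length + 1) = l.length + 1 + s' from by omega]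
                  simp only [drop_split, take_split]
                  by_cases hsw : PySem.Chars.startswith (r.drop s') ['#', ' ']
                  · rw [if_pos hsw, if_pos hsw]
                  · rw [if_neg hsw, if_neg hsw]
                    simp
                have hA : aCore (l ++ '\n' :: r) t = l ++ '\n' :: aCore r t := by
                  cases b with
                  | true =>
                    have h1 : aCore (l ++ '\n' :: r) t = l ++ '\n' :: r := by
                      simp only [aCore]
                      rw [hlines, aCheck, if_neg (by simp [hstrip]), hCL]
                    rw [h1, aCore_check_true r t hCL]
                  | false =>
                    obtain ⟨ins, hins, hne⟩ := aIns_some_of ('#' :: ' ' :: t) _ false hCL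
                    have hchk : aCheck (l :: msp [] r) = some false := by
                      rw [aCheck, if_neg (by simp [hstrip]), hCL]
                    have hins2 : aIns ('#' :: ' ' :: t) (l :: msp [] r) = some (l :: ins) := by
                      rw [aIns, if_neg (by simp [hstrip]), hins]
                      rfl
                    have h1 : aCore (l ++ '\n' :: r) t = PySem.Chars.join ['\n'] (l :: ins) := by
                      refine aCore_check_false _ t _ ?_ ?_
                      · rw [msp_nil_split l r hnl]; exact hchk
                      · rw [msp_nil_split l r hnl]; exact hins2
                    obtain ⟨i0, irest, rfl⟩ := List.exists_cons_of_ne_nil hne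
                    rw [h1, PySem.Chars.join_cons_cons,
                      aCore_check_false r t _ hCL hins]
                    simp
                rw [hA, hB, ih r t hlenr]
        · -- first line carries text: both sides act at position 0
          have hstrip : PySem.Chars.strip l ≠ [] := by rw [Ne, strip_nil_iff]; exact halll
          have hb : bLoop (l ++ '\n' :: r) 0 0 = some 0 := bLoop_found l _ 0 0 hnl halll
          simp only [aCore, bCore]
          rw [hlines, hb, aCheck, if_pos hstrip]
          by_cases hsw : PySem.Chars.startswith l ['#', ' ']
          · simp [hsw, startswith_line]
          · simp [hsw, hstrip, startswith_line]
      · exact core_eq_no_nl c t hmem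
  exact key c.length c t le_rfl

-- ===== VERDICT (by name: the statement is the Claim_ definition above) =====
theorem add_main_title_spec : Claim_equal_add_main_title := by
  intro content title _
  show add_main_title content title = add_main_title_alt content title
  unfold add_main_title add_main_title_alt
  rw [core_eq]
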